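-- pv_equiv track=rewrite | github.com/Th0rgal/morpho-verity | scripts/workflow_run_parser.py | _consume_multiline_inline_env_mapping
-- ===== SOURCE A (Python) =====
-- def _consume_multiline_inline_env_mapping(
--   lines: list[str],
--   start_index: int,
--   raw: str,
--   field_indent: int,
-- ) -> tuple[str, int]:
--   if not raw.strip().startswith("{") or _extract_inline_env_mapping_body(raw) is not None:
--     return raw, start_index + 1
--
--   parts = [raw.rstrip()]
--   next_index = start_index + 1
--   while next_index < len(lines):
--     candidate = lines[next_index]
--     stripped = candidate.lstrip(" ")
--     if stripped:
--       indent = len(candidate) - len(stripped)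
--       if indent <= field_indent:
--         break
--       parts.append(stripped)
--     else:
--       parts.append("")
--     combined = "\n".join(parts)
--     next_index += 1
--     if _extract_inline_env_mapping_body(combined) is not None:
--       return combined, next_index
--   return raw, start_index + 1
--
-- def _extract_inline_env_mapping_body(raw: str) -> str | None:
--   value = raw.strip()
--   if not value.startswith("{"):
--     return None
--
--   depth = 0
--   in_single_quote = False
--   in_double_quote = False
--   escape = False
--   index = 0
--   while index < len(value):
--     char = value[index]
--     if in_single_quote:
--       if char == "'":
--         if index + 1 < len(value) and value[index + 1] == "'":
--           index += 2
--           continue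
--         in_single_quote = False
--       index += 1
--       continue
--     if in_double_quote:
--       if escape:
--         escape = False
--         index += 1
--         continue
--       if char == "\\":
--         escape = True
--         index += 1
--         continue
--       if char == '"':
--         in_double_quote = False
--       index += 1
--       continue
--
--     if char == "'":
--       in_single_quote = True
--       index += 1
--       continue
--     if char == '"':
--       in_double_quote = True
--       index += 1
--       continue
--     if char == "{":
--       depth += 1
--       index += 1
--       continue
--     if char != "}":
--       index += 1
--       continue
--
--     depth -= 1
--     if depth != 0:
--       index += 1
--       continue
--     remainder = value[index + 1:].strip()
--     if remainder and not remainder.startswith("#"):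
--       return None
--     return value[1:index]
--   return None
-- ===== SOURCE B (Python) =====
-- # B: single-pass incremental brace/quote scanner — feeds each appended line into a
-- # persistent state machine instead of re-scanning the whole joined text every iteration.
--
-- _START, _DEAD, _NORM, _SQ, _SQP, _DQ, _DQE, _CLOSED = range(8)
--
--
-- def _scan_normal(depth, ch):
--   if ch == "'":
--     return (_SQ, depth, None)
--   if ch == '"':
--     return (_DQ, depth, None)
--   if ch == "{":
--     return (_NORM, depth + 1, None)
--   if ch == "}":
--     return (_CLOSED, 0, None) if depth == 1 else (_NORM, depth - 1, None)
--   return (_NORM, depth, None)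
--
--
-- def _scan_step(st, ch):
--   mode, depth, rem = st
--   if mode == _CLOSED:
--     if rem is None and not ch.isspace():
--       return (_CLOSED, depth, ch)
--     return st
--   if mode == _DEAD:
--     return st
--   if mode == _START:
--     return (_NORM, 1, None) if ch == "{" else (_DEAD, 0, None)
--   if mode == _SQ:
--     return (_SQP, depth, None) if ch == "'" else st
--   if mode == _SQP:
--     return (_SQ, depth, None) if ch == "'" else _scan_normal(depth, ch)
--   if mode == _DQ:
--     if ch == "\\":
--       return (_DQE, depth, None)
--     if ch == '"':
--       return (_NORM, depth, None)
--     return st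
--   if mode == _DQE:
--     return (_DQ, depth, None)
--   return _scan_normal(depth, ch)
--
--
-- def _scan_found(st):
--   mode, _, rem = st
--   return mode == _CLOSED and (rem is None or rem == "#")
--
--
-- def _consume_multiline_inline_env_mapping(
--   lines: list[str],
--   start_index: int,
--   raw: str,
--   field_indent: int,
-- ) -> tuple[str, int]:
--   state = (_START, 0, None)
--   for ch in raw.strip():
--     state = _scan_step(state, ch)
--   if not raw.strip().startswith("{") or _scan_found(state):
--     return raw, start_index + 1
--
--   parts = [raw.rstrip()]
--   next_index = start_index + 1
--   while next_index < len(lines):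
--     candidate = lines[next_index]
--     stripped = candidate.lstrip(" ")
--     if stripped and len(candidate) - len(stripped) <= field_indent:
--       break
--     parts.append(stripped)
--     next_index += 1
--     state = _scan_step(state, "\n")
--     for ch in stripped:
--       state = _scan_step(state, ch)
--     if _scan_found(state):
--       return "\n".join(parts), next_index
--   return raw, start_index + 1
-- ===== Notes on version B (the rewrite author's own statement) =====
-- stated objective: alternative
-- what changed: A re-joins all accumulated parts and re-scans the whole combined text with the brace/quote parser after every appended line; B feeds each appended line once into a persistent single-pass scanner state (mode/depth/first-char-after-close), examining each character a bounded number of times.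
-- outside the precondition, e.g. on _consume_multiline_inline_env_mapping(['x'], -10, '{}', 0): A returns ('{}', -9), B returns ('{}', -9)
import Mathlib
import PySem

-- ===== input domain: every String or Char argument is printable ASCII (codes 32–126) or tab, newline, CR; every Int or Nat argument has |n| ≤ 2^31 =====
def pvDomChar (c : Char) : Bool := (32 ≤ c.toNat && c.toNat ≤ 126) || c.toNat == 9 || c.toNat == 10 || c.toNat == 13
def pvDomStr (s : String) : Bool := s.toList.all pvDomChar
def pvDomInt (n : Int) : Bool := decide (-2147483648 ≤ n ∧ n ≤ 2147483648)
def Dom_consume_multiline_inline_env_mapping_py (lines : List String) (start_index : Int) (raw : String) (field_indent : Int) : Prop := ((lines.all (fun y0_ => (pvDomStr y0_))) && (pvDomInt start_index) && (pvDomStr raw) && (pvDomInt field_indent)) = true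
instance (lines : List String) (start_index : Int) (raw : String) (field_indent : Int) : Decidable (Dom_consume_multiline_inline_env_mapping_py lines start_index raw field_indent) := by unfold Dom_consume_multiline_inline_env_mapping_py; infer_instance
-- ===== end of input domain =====

-- B replaces A's per-line full rescan of the joined text by one persistent brace/quote
-- state machine fed each appended line once (objective: alternative algorithm).
-- Mutation note: neither version mutates its arguments; the equivalence is about return values.

-- ===== PORT A =====
-- _extract_inline_env_mapping_body's while loop, index-based, step for step.
def pvExtractLoop (value : List Char) (depth : Int) (insq indq esc : Bool) (index : Nat) :
    Option (List Char) :=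
  if h : index < value.length then
    let char := value[index]
    if insq = true then
      if char = '\'' then
        if h2 : index + 1 < value.length then
          if value[index + 1] = '\'' then
            pvExtractLoop value depth insq indq esc (index + 2)
          else
            pvExtractLoop value depth false indq esc (index + 1)
        else
          pvExtractLoop value depth false indq esc (index + 1)
      else
        pvExtractLoop value depth insq indq esc (index + 1)
    else if indq = true then
      if esc = true then pvExtractLoop value depth insq indq false (index + 1)
      else if char = '\\' then pvExtractLoop value depth insq indq true (index + 1)
      else if char = '"' then pvExtractLoop value depth insq false esc (index + 1)
      else pvExtractLoop value depth insq indq esc (index + 1)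
    else if char = '\'' then pvExtractLoop value depth true indq esc (index + 1)
    else if char = '"' then pvExtractLoop value depth insq true esc (index + 1)
    else if char = '{' then pvExtractLoop value (depth + 1) insq indq esc (index + 1)
    else if char ≠ '}' then pvExtractLoop value depth insq indq esc (index + 1)
    else
      if depth - 1 ≠ 0 then pvExtractLoop value (depth - 1) insq indq esc (index + 1)
      else
        let remainder := PySem.Chars.strip (value.drop (index + 1))
        if remainder ≠ [] ∧ ¬ (PySem.Chars.startswith remainder ['#'] = true) then none
        else some ((value.take index).drop 1)
  else none
termination_by value.length - index

def pvExtractA (raw : List Char) : Option (List Char) :=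
  let value := PySem.Chars.strip raw
  if PySem.Chars.startswith value ['{'] = true then pvExtractLoop value 0 false false false 0
  else none

-- the while loop of _consume_multiline_inline_env_mapping (lines[next_index] via pyGetD; Pre_ keeps indexing in range)
-- candidate / stripped locals of both Pythons, shared: candidate = lines[next_index], stripped = candidate.lstrip(" ")
def pvCand (lines : List String) (next_index : Int) : List Char :=
  (PySem.List.pyGetD lines next_index "").toList

-- .lstrip(" "): drop leading SPACE characters only (exact port by hand)
def pvStripped (candidate : List Char) : List Char :=
  candidate.dropWhile (fun c => c == ' ')

def pvALoop (lines : List String) (field_indent : Int) (raw : String) (start_index : Int)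
    (parts : List (List Char)) (next_index : Int) : String × Int :=
  if h : next_index < (lines.length : Int) then
    if pvStripped (pvCand lines next_index) ≠ [] then
      if ((pvCand lines next_index).length : Int) -
          ((pvStripped (pvCand lines next_index)).length : Int) ≤ field_indent then
        (raw, start_index + 1)
      else
        if (pvExtractA (PySem.Chars.join ['\n']
            (parts ++ [pvStripped (pvCand lines next_index)]))).isSome then
          (String.ofList (PySem.Chars.join ['\n']
            (parts ++ [pvStripped (pvCand lines next_index)])), next_index + 1)
        else
          pvALoop lines field_indent raw start_index
            (parts ++ [pvStripped (pvCand lines next_index)]) (next_index + 1)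
    else
      if (pvExtractA (PySem.Chars.join ['\n'] (parts ++ [([] : List Char)]))).isSome then
        (String.ofList (PySem.Chars.join ['\n'] (parts ++ [([] : List Char)])), next_index + 1)
      else
        pvALoop lines field_indent raw start_index (parts ++ [([] : List Char)]) (next_index + 1)
  else (raw, start_index + 1)
termination_by ((lines.length : Int) - next_index).toNat
decreasing_by all_goals omega

def consume_multiline_inline_env_mapping_py (lines : List String) (start_index : Int)
    (raw : String) (field_indent : Int) : String × Int :=
  if ¬ (PySem.Chars.startswith (PySem.Chars.strip raw.toList) ['{'] = true) ∨
      (pvExtractA raw.toList).isSome then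
    (raw, start_index + 1)
  else
    pvALoop lines field_indent raw start_index [PySem.Chars.rstrip raw.toList] (start_index + 1)

-- ===== PORT B =====
inductive PvMode : Type
  | start | dead | norm | sq | sqp | dq | dqe | closed
deriving DecidableEq, Repr

structure PvSt : Type where
  mode : PvMode
  depth : Int
  rem : Option Char
deriving DecidableEq, Repr

def pvScanNormal (depth : Int) (c : Char) : PvSt :=
  if c = '\'' then ⟨.sq, depth, none⟩
  else if c = '"' then ⟨.dq, depth, none⟩
  else if c = '{' then ⟨.norm, depth + 1, none⟩
  else if c = '}' then (if depth = 1 then ⟨.closed, 0, none⟩ else ⟨.norm, depth - 1, none⟩)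
  else ⟨.norm, depth, none⟩

def pvScanStep (st : PvSt) (c : Char) : PvSt :=
  match st.mode with
  | .closed =>
      if st.rem = none ∧ ¬ (PySem.Chars.isspace c = true) then ⟨.closed, st.depth, some c⟩
      else st
  | .dead => st
  | .start => if c = '{' then ⟨.norm, 1, none⟩ else ⟨.dead, 0, none⟩
  | .sq => if c = '\'' then ⟨.sqp, st.depth, none⟩ else st
  | .sqp => if c = '\'' then ⟨.sq, st.depth, none⟩ else pvScanNormal st.depth c
  | .dq =>
      if c = '\\' then ⟨.dqe, st.depth, none⟩
      else if c = '"' then ⟨.norm, st.depth, none⟩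
      else st
  | .dqe => ⟨.dq, st.depth, none⟩
  | .norm => pvScanNormal st.depth c

def pvScan (st : PvSt) (cs : List Char) : PvSt := cs.foldl pvScanStep st

def pvScanFound (st : PvSt) : Bool :=
  match st.mode with
  | .closed => if st.rem = none ∨ st.rem = some '#' then true else false
  | _ => false

def pvBLoop (lines : List String) (field_indent : Int) (raw : String) (start_index : Int)
    (parts : List (List Char)) (st : PvSt) (next_index : Int) : String × Int :=
  if h : next_index < (lines.length : Int) then
    if pvStripped (pvCand lines next_index) ≠ [] ∧
        ((pvCand lines next_index).length : Int) -
          ((pvStripped (pvCand lines next_index)).length : Int) ≤ field_indent then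
      (raw, start_index + 1)
    else
      if pvScanFound (pvScan (pvScanStep st '\n') (pvStripped (pvCand lines next_index))) then
        (String.ofList (PySem.Chars.join ['\n']
          (parts ++ [pvStripped (pvCand lines next_index)])), next_index + 1)
      else
        pvBLoop lines field_indent raw start_index
          (parts ++ [pvStripped (pvCand lines next_index)])
          (pvScan (pvScanStep st '\n') (pvStripped (pvCand lines next_index))) (next_index + 1)
  else (raw, start_index + 1)
termination_by ((lines.length : Int) - next_index).toNat
decreasing_by all_goals omega

def consume_multiline_inline_env_mapping_py_alt (lines : List String) (start_index : Int)
    (raw : String) (field_indent : Int) : String × Int :=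
  let s := PySem.Chars.strip raw.toList
  let st := pvScan ⟨.start, 0, none⟩ s
  if ¬ (PySem.Chars.startswith s ['{'] = true) ∨ pvScanFound st then (raw, start_index + 1)
  else pvBLoop lines field_indent raw start_index [PySem.Chars.rstrip raw.toList] st (start_index + 1)

-- ===== PRECONDITION & SPEC =====
-- Pre_ excludes start indices with start_index + 1 < -len(lines) when raw looks like an inline
-- mapping start: entering the continuation loop there indexes lines[start_index+1] out of range
-- and Python raises IndexError (on the few such inputs where the guard short-circuits first,
-- e.g. raw = "{}", A returns (raw, start_index+1) and B returns the same).
def Pre_consume_multiline_inline_env_mapping_py (lines : List String) (start_index : Int) (raw : String) (field_indent : Int) : Prop :=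
  PySem.Chars.startswith (PySem.Chars.strip raw.toList) ['{'] = true →
    (-(lines.length : Int) ≤ start_index + 1 ∨ (lines.length : Int) ≤ start_index + 1)
instance (lines : List String) (start_index : Int) (raw : String) (field_indent : Int) : Decidable (Pre_consume_multiline_inline_env_mapping_py lines start_index raw field_indent) := by unfold Pre_consume_multiline_inline_env_mapping_py; infer_instance

def pvWitness_consume_multiline_inline_env_mapping_py : List String × Int × String × Int :=
  (["  A: 1", "}"], 0, "{", 1)

def Spec_consume_multiline_inline_env_mapping_py (lines : List String) (start_index : Int) (raw : String) (field_indent : Int) (out : String × Int) : Prop := out = consume_multiline_inline_env_mapping_py_alt lines start_index raw field_indent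
instance (lines : List String) (start_index : Int) (raw : String) (field_indent : Int) (out : String × Int) : Decidable (Spec_consume_multiline_inline_env_mapping_py lines start_index raw field_indent out) := by unfold Spec_consume_multiline_inline_env_mapping_py; infer_instance

-- ===== CLAIM (what is proved, stated in full; the proofs are below) =====
def Claim_equal_consume_multiline_inline_env_mapping_py : Prop := ∀ (lines : List String) (start_index : Int) (raw : String) (field_indent : Int), Dom_consume_multiline_inline_env_mapping_py lines start_index raw field_indent → Pre_consume_multiline_inline_env_mapping_py lines start_index raw field_indent → Spec_consume_multiline_inline_env_mapping_py lines start_index raw field_indent (consume_multiline_inline_env_mapping_py lines start_index raw field_indent)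

-- ===== LEMMAS AND PROOFS =====

-- map A's loop flags to B's scanner mode
def pvStOf (depth : Int) (insq indq esc : Bool) : PvSt :=
  if insq then ⟨.sq, depth, none⟩
  else if indq then (if esc then ⟨.dqe, depth, none⟩ else ⟨.dq, depth, none⟩)
  else ⟨.norm, depth, none⟩

theorem pv_dead_scan (d : Int) (r : Option Char) (l : List Char) :
    pvScan ⟨.dead, d, r⟩ l = ⟨.dead, d, r⟩ := by
  induction l with
  | nil => rfl
  | cons c l ih => simpa [pvScan, pvScanStep] using ih

theorem pv_closed_some_scan (d : Int) (x : Char) (l : List Char) :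
    pvScan ⟨.closed, d, some x⟩ l = ⟨.closed, d, some x⟩ := by
  induction l with
  | nil => rfl
  | cons c l ih => simpa [pvScan, pvScanStep] using ih

theorem pv_rstrip_decomp (l : List Char) :
    ∃ t, l = PySem.Chars.rstrip l ++ t ∧ ∀ c ∈ t, PySem.Chars.isspace c = true := by
  refine ⟨(l.reverse.takeWhile PySem.Chars.isspace).reverse, ?_, ?_⟩
  · simp only [PySem.Chars.rstrip]
    rw [← List.reverse_append, List.takeWhile_append_dropWhile, List.reverse_reverse]
  · intro c hc
    rw [List.mem_reverse] at hc
    exact List.mem_takeWhile_imp hc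

theorem pv_rstrip_nil_iff (l : List Char) :
    PySem.Chars.rstrip l = [] ↔ PySem.Chars.lstrip l = [] := by
  simp [PySem.Chars.rstrip, PySem.Chars.lstrip, List.dropWhile_eq_nil_iff]

theorem pv_isEmpty_iff (l : List Char) :
    (List.dropWhile PySem.Chars.isspace l.reverse).isEmpty = true ↔ PySem.Chars.rstrip l = [] := by
  simp [PySem.Chars.rstrip, List.isEmpty_iff]

theorem pv_rstrip_cons (c : Char) (l : List Char) (hc : ¬ PySem.Chars.isspace c = true) :
    PySem.Chars.rstrip (c :: l) =
      if PySem.Chars.rstrip l = [] then [c] else c :: PySem.Chars.rstrip l := by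
  rw [show PySem.Chars.rstrip (c :: l)
      = (List.dropWhile PySem.Chars.isspace (l.reverse ++ [c])).reverse from by
        simp [PySem.Chars.rstrip],
    List.dropWhile_append]
  by_cases hr : PySem.Chars.rstrip l = []
  · rw [if_pos ((pv_isEmpty_iff l).2 hr), if_pos hr]
    simp [List.dropWhile, hc]
  · rw [if_neg (fun h => hr ((pv_isEmpty_iff l).1 h)), if_neg hr, List.reverse_append]
    simp [PySem.Chars.rstrip]

theorem pv_rstrip_cons_ws (c : Char) (l : List Char) (hc : PySem.Chars.isspace c = true) :
    PySem.Chars.rstrip (c :: l) =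
      if PySem.Chars.rstrip l = [] then [] else c :: PySem.Chars.rstrip l := by
  rw [show PySem.Chars.rstrip (c :: l)
      = (List.dropWhile PySem.Chars.isspace (l.reverse ++ [c])).reverse from by
        simp [PySem.Chars.rstrip],
    List.dropWhile_append]
  by_cases hr : PySem.Chars.rstrip l = []
  · rw [if_pos ((pv_isEmpty_iff l).2 hr), if_pos hr]
    simp [List.dropWhile, hc]
  · rw [if_neg (fun h => hr ((pv_isEmpty_iff l).1 h)), if_neg hr, List.reverse_append]
    simp [PySem.Chars.rstrip]

theorem pv_strip_comm (l : List Char) :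
    PySem.Chars.lstrip (PySem.Chars.rstrip l) = PySem.Chars.strip l := by
  induction l with
  | nil => rfl
  | cons c l ih =>
      by_cases hc : PySem.Chars.isspace c = true
      · have hl : PySem.Chars.lstrip (c :: l) = PySem.Chars.lstrip l := by
          simp [PySem.Chars.lstrip, List.dropWhile, hc]
        rw [pv_rstrip_cons_ws c l hc]
        split_ifs with h0
        · have h1 : PySem.Chars.lstrip l = [] := (pv_rstrip_nil_iff l).1 h0
          have h2 : List.dropWhile PySem.Chars.isspace (c :: l) = [] := by
            simpa [PySem.Chars.lstrip, List.dropWhile, hc] using h1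
          show PySem.Chars.lstrip [] = PySem.Chars.strip (c :: l)
          simp [PySem.Chars.strip, PySem.Chars.lstrip, PySem.Chars.rstrip, h2]
        · have : PySem.Chars.lstrip (c :: PySem.Chars.rstrip l) =
              PySem.Chars.lstrip (PySem.Chars.rstrip l) := by
            simp [PySem.Chars.lstrip, List.dropWhile, hc]
          rw [this, ih]
          simp [PySem.Chars.strip, hl]
      · have hl : PySem.Chars.lstrip (c :: l) = c :: l := by
          simp [PySem.Chars.lstrip, List.dropWhile, hc]
        have hstrip : PySem.Chars.strip (c :: l) = PySem.Chars.rstrip (c :: l) := by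
          simp [PySem.Chars.strip, hl]
        rw [hstrip, pv_rstrip_cons c l hc]
        split_ifs with h0 <;> simp [PySem.Chars.lstrip, List.dropWhile, hc]

-- after the closing brace B just records the first non-whitespace character;
-- this matches A's stripped-remainder test
theorem pv_closed_scan (d : Int) (l : List Char) :
    pvScanFound (pvScan ⟨.closed, d, none⟩ l) =
      (decide (PySem.Chars.strip l = []) ||
        PySem.Chars.startswith (PySem.Chars.strip l) ['#']) := by
  induction l with
  | nil => simp [pvScan, pvScanFound, PySem.Chars.strip, PySem.Chars.lstrip, PySem.Chars.rstrip,
      PySem.Chars.startswith]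
  | cons c l ih =>
      by_cases hc : PySem.Chars.isspace c = true
      · have h1 : pvScan ⟨.closed, d, none⟩ (c :: l) = pvScan ⟨.closed, d, none⟩ l := by
          simp [pvScan, pvScanStep, hc]
        have h2 : PySem.Chars.strip (c :: l) = PySem.Chars.strip l := by
          simp [PySem.Chars.strip, PySem.Chars.lstrip, List.dropWhile, hc]
        rw [h1, h2, ih]
      · have h1 : pvScan ⟨.closed, d, none⟩ (c :: l) = pvScan ⟨.closed, d, some c⟩ l := by
          simp [pvScan, pvScanStep, hc]
        have hlc : PySem.Chars.lstrip (c :: l) = c :: l := by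
          simp [PySem.Chars.lstrip, List.dropWhile, hc]
        have h2 : PySem.Chars.strip (c :: l) =
            if PySem.Chars.rstrip l = [] then [c] else c :: PySem.Chars.rstrip l := by
          rw [PySem.Chars.strip, hlc, pv_rstrip_cons c l hc]
        rw [h1, pv_closed_some_scan, h2]
        split_ifs with h0 <;> by_cases hch : c = '#'
        all_goals try (subst hch; simp [pvScanFound, PySem.Chars.startswith, List.isPrefixOf])
        all_goals
          have hch' : ¬ '#' = c := fun h => hch h.symm
          simp [pvScanFound, PySem.Chars.startswith, List.isPrefixOf, hch, hch']

-- whitespace characters never change whether the scanner has found a mapping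
theorem pv_ws_step (st : PvSt) (c : Char) (hc : PySem.Chars.isspace c = true) :
    pvScanFound (pvScanStep st c) = pvScanFound st := by
  have hne : c ≠ '\'' ∧ c ≠ '"' ∧ c ≠ '{' ∧ c ≠ '}' ∧ c ≠ '\\' := by
    refine ⟨?_, ?_, ?_, ?_, ?_⟩ <;> rintro rfl <;> revert hc <;> decide
  obtain ⟨h1, h2, h3, h4, h5⟩ := hne
  obtain ⟨m, d, r⟩ := st
  cases m <;> simp [pvScanStep, pvScanNormal, pvScanFound, hc, h1, h2, h3, h4, h5]

theorem pv_ws_scan (st : PvSt) (l : List Char) (hl : ∀ c ∈ l, PySem.Chars.isspace c = true) :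
    pvScanFound (pvScan st l) = pvScanFound st := by
  induction l generalizing st with
  | nil => rfl
  | cons c l ih =>
      have : pvScan st (c :: l) = pvScan (pvScanStep st c) l := rfl
      rw [this, ih _ (fun x hx => hl x (List.mem_cons_of_mem _ hx)),
        pv_ws_step st c (hl c List.mem_cons_self)]

theorem pv_scan_drop_step (st : PvSt) (value : List Char) (index : Nat)
    (h : index < value.length) :
    pvScan st (value.drop index) = pvScan (pvScanStep st value[index]) (value.drop (index + 1)) := by
  rw [List.drop_eq_getElem_cons h]; rfl

theorem pv_scan_append (st : PvSt) (a b : List Char) :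
    pvScan st (a ++ b) = pvScan (pvScan st a) b :=
  List.foldl_append

-- core correspondence: A's scan-from-scratch loop agrees with B's scanner on the suffix
theorem pv_loop_eq_aux : ∀ n value (index : Nat) (depth : Int) (insq indq esc : Bool),
    value.length - index = n → (insq = true → indq = false) → (esc = true → indq = true) →
    (pvExtractLoop value depth insq indq esc index).isSome =
      pvScanFound (pvScan (pvStOf depth insq indq esc) (value.drop index)) := by
  intro n
  induction n using Nat.strong_induction_on with
  | h n IH =>
    intro value index depth insq indq esc hn hins hesc
    by_cases h : index < value.length
    · rw [pvExtractLoop, dif_pos h]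
      cases insq with
      | true =>
        have hindq : indq = false := hins rfl
        have hescf : esc = false := by
          cases esc
          · rfl
          · simp [hesc rfl] at hindq
        subst hindq hescf
        rw [if_pos rfl]
        by_cases hq : value[index] = '\''
        · rw [if_pos hq]
          by_cases h2 : index + 1 < value.length
          · rw [dif_pos h2]
            by_cases hq2 : value[index + 1] = '\''
            · rw [if_pos hq2,
                IH (value.length - (index + 2)) (by omega) value (index + 2) depth true false false
                  rfl hins hesc,
                pv_scan_drop_step _ _ _ h, pv_scan_drop_step _ _ _ h2]
              simp [pvStOf, pvScanStep, hq, hq2]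
            · rw [if_neg hq2,
                IH (value.length - (index + 1)) (by omega) value (index + 1) depth false false false
                  rfl (by simp) (by simp),
                pv_scan_drop_step _ _ _ h, pv_scan_drop_step _ _ _ h2,
                pv_scan_drop_step _ _ _ h2]
              simp [pvStOf, pvScanStep, pvScanNormal, hq, hq2]
          · have he : value.drop (index + 1) = [] := List.drop_of_length_le (by omega)
            rw [dif_neg h2,
              IH (value.length - (index + 1)) (by omega) value (index + 1) depth false false false
                rfl (by simp) (by simp),
              pv_scan_drop_step _ _ _ h, he]
            simp [pvScan, pvStOf, pvScanStep, pvScanFound, hq]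
        · rw [if_neg hq,
            IH (value.length - (index + 1)) (by omega) value (index + 1) depth true false false
              rfl hins hesc,
            pv_scan_drop_step _ _ _ h]
          simp [pvStOf, pvScanStep, hq]
      | false =>
        simp only [Bool.false_eq_true, if_false]
        cases indq with
        | true =>
          rw [if_pos rfl]
          cases esc with
          | true =>
            rw [if_pos rfl,
              IH (value.length - (index + 1)) (by omega) value (index + 1) depth false true false
                rfl (by simp) (by simp),
              pv_scan_drop_step _ _ _ h]
            simp [pvStOf, pvScanStep]
          | false =>
            simp only [Bool.false_eq_true, if_false]
            by_cases hb : value[index] = '\\'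
            · rw [if_pos hb,
                IH (value.length - (index + 1)) (by omega) value (index + 1) depth false true true
                  rfl (by simp) (by simp),
                pv_scan_drop_step _ _ _ h]
              simp [pvStOf, pvScanStep, hb]
            · rw [if_neg hb]
              by_cases hd : value[index] = '"'
              · rw [if_pos hd,
                  IH (value.length - (index + 1)) (by omega) value (index + 1) depth false false
                    false rfl (by simp) (by simp),
                  pv_scan_drop_step _ _ _ h]
                simp [pvStOf, pvScanStep, hb, hd]
              · rw [if_neg hd,
                  IH (value.length - (index + 1)) (by omega) value (index + 1) depth false true
                    false rfl (by simp) (by simp),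
                  pv_scan_drop_step _ _ _ h]
                simp [pvStOf, pvScanStep, hb, hd]
        | false =>
          have hescf : esc = false := by
            cases esc
            · rfl
            · simpa using hesc rfl
          subst hescf
          simp only [Bool.false_eq_true, if_false]
          by_cases hq : value[index] = '\''
          · rw [if_pos hq,
              IH (value.length - (index + 1)) (by omega) value (index + 1) depth true false false
                rfl (by simp) (by simp),
              pv_scan_drop_step _ _ _ h]
            simp [pvStOf, pvScanStep, pvScanNormal, hq]
          · rw [if_neg hq]
            by_cases hd : value[index] = '"'
            · rw [if_pos hd,
                IH (value.length - (index + 1)) (by omega) value (index + 1) depth false true false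
                  rfl (by simp) (by simp),
                pv_scan_drop_step _ _ _ h]
              simp [pvStOf, pvScanStep, pvScanNormal, hq, hd]
            · rw [if_neg hd]
              by_cases ho : value[index] = '{'
              · rw [if_pos ho,
                  IH (value.length - (index + 1)) (by omega) value (index + 1) (depth + 1) false
                    false false rfl (by simp) (by simp),
                  pv_scan_drop_step _ _ _ h]
                simp [pvStOf, pvScanStep, pvScanNormal, hq, hd, ho]
              · rw [if_neg ho]
                by_cases hcl : value[index] = '}'
                · rw [if_neg (by simpa using hcl)]
                  by_cases hdep : depth - 1 ≠ 0
                  · rw [if_pos hdep,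
                      IH (value.length - (index + 1)) (by omega) value (index + 1) (depth - 1)
                        false false false rfl (by simp) (by simp),
                      pv_scan_drop_step _ _ _ h]
                    simp [pvStOf, pvScanStep, pvScanNormal, hq, hd, ho, hcl,
                      show ¬ depth = 1 by omega]
                  · rw [if_neg hdep, pv_scan_drop_step _ _ _ h,
                      show pvScanStep (pvStOf depth false false false) value[index]
                          = ⟨.closed, 0, none⟩ by
                        simp [pvStOf, pvScanStep, pvScanNormal, hq, hd, ho, hcl,
                          show depth = 1 by omega],
                      pv_closed_scan]
                    by_cases hrem : PySem.Chars.strip (value.drop (index + 1)) ≠ [] ∧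
                        ¬ (PySem.Chars.startswith (PySem.Chars.strip (value.drop (index + 1)))
                          ['#'] = true)
                    · rw [if_pos hrem]
                      rcases hrem with ⟨hr1, hr2⟩
                      simp [hr1, hr2]
                    · rw [if_neg hrem]
                      push_neg at hrem
                      by_cases hr1 : PySem.Chars.strip (value.drop (index + 1)) = []
                      · simp [hr1]
                      · simp [hr1, hrem hr1]
                · rw [if_pos (by simpa using hcl),
                    IH (value.length - (index + 1)) (by omega) value (index + 1) depth false false
                      false rfl (by simp) (by simp),
                    pv_scan_drop_step _ _ _ h]
                  simp [pvStOf, pvScanStep, pvScanNormal, hq, hd, ho, hcl]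
    · rw [pvExtractLoop, dif_neg h, List.drop_of_length_le (by omega)]
      simp only [pvScan, List.foldl_nil, Option.isSome_none]
      unfold pvStOf
      split_ifs <;> simp [pvScanFound]

theorem pv_extract_eq_scan (cs : List Char) :
    (pvExtractA cs).isSome = pvScanFound (pvScan ⟨.start, 0, none⟩ (PySem.Chars.lstrip cs)) := by
  obtain ⟨t, ht, hws⟩ := pv_rstrip_decomp (PySem.Chars.lstrip cs)
  have hsplit : PySem.Chars.lstrip cs = PySem.Chars.strip cs ++ t := ht
  rw [hsplit,
    show pvScan ⟨.start, 0, none⟩ (PySem.Chars.strip cs ++ t)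
        = pvScan (pvScan ⟨.start, 0, none⟩ (PySem.Chars.strip cs)) t from
      List.foldl_append,
    pv_ws_scan _ t hws]
  simp only [pvExtractA]
  cases hs : PySem.Chars.strip cs with
  | nil => simp [PySem.Chars.startswith, pvScan, pvScanFound, List.isPrefixOf]
  | cons c rest =>
      by_cases hb : c = '{'
      · subst hb
        rw [if_pos (by simp [PySem.Chars.startswith, List.isPrefixOf])]
        rw [pvExtractLoop, dif_pos (by simp : 0 < ('{' :: rest).length)]
        rw [show pvScan ⟨.start, 0, none⟩ ('{' :: rest) = pvScan ⟨.norm, 1, none⟩ rest from by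
            simp [pvScan, pvScanStep]]
        simp only [List.getElem_cons_zero, Bool.false_eq_true, if_false]
        rw [if_neg (by decide), if_neg (by decide), if_pos trivial]
        have hx := pv_loop_eq_aux (('{' :: rest).length - 1) ('{' :: rest) 1 1 false false false
          rfl (by simp) (by simp)
        simpa [pvStOf] using hx
      · rw [if_neg (by
            simp only [PySem.Chars.startswith, List.isPrefixOf, Bool.and_eq_true, beq_iff_eq]
            rintro ⟨rfl, -⟩
            exact hb rfl)]
        rw [show pvScan ⟨.start, 0, none⟩ (c :: rest) = pvScan ⟨.dead, 0, none⟩ rest from by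
            simp [pvScan, pvScanStep, hb],
          pv_dead_scan]
        simp [pvScanFound]

theorem pv_extract_eq_scan_strip (cs : List Char) :
    (pvExtractA cs).isSome = pvScanFound (pvScan ⟨.start, 0, none⟩ (PySem.Chars.strip cs)) := by
  obtain ⟨t, ht, hws⟩ := pv_rstrip_decomp (PySem.Chars.lstrip cs)
  have hsplit : PySem.Chars.lstrip cs = PySem.Chars.strip cs ++ t := ht
  rw [pv_extract_eq_scan, hsplit,
    show pvScan ⟨.start, 0, none⟩ (PySem.Chars.strip cs ++ t)
        = pvScan (pvScan ⟨.start, 0, none⟩ (PySem.Chars.strip cs)) t from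
      List.foldl_append,
    pv_ws_scan _ t hws]

theorem pv_lstrip_append (a b : List Char) (ha : PySem.Chars.lstrip a ≠ []) :
    PySem.Chars.lstrip (a ++ b) = PySem.Chars.lstrip a ++ b := by
  simp only [PySem.Chars.lstrip, List.dropWhile_append]
  rw [if_neg (by simpa [List.isEmpty_iff, PySem.Chars.lstrip] using ha)]

theorem pv_join_append (sep : List Char) (parts : List (List Char)) (x : List Char)
    (hp : parts ≠ []) :
    PySem.Chars.join sep (parts ++ [x]) = PySem.Chars.join sep parts ++ sep ++ x := by
  induction parts with
  | nil => simp at hp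
  | cons p ps ih =>
      cases ps with
      | nil => simp [PySem.Chars.join, List.intercalate]
      | cons q qs =>
          have h2 := ih (by simp)
          have hstep : ∀ (a : List Char) (bs : List (List Char)), bs ≠ [] →
              sep.intercalate (a :: bs) = a ++ sep ++ sep.intercalate bs := by
            intro a bs hbs
            cases bs with
            | nil => exact absurd rfl hbs
            | cons b bs' => simp [List.intercalate, List.intersperse]
          simp only [PySem.Chars.join] at *
          rw [List.cons_append, hstep p ((q :: qs) ++ [x]) (by simp), h2,
            hstep p (q :: qs) (by simp)]
          simp [List.append_assoc]

theorem pv_main_loop_eq : ∀ (n : Nat) (lines : List String) (field_indent : Int) (raw : String)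
    (start_index : Int) (parts : List (List Char)) (st : PvSt) (next_index : Int),
    ((lines.length : Int) - next_index).toNat = n →
    st = pvScan ⟨.start, 0, none⟩ (PySem.Chars.lstrip (PySem.Chars.join ['\n'] parts)) →
    PySem.Chars.lstrip (PySem.Chars.join ['\n'] parts) ≠ [] →
    pvALoop lines field_indent raw start_index parts next_index =
      pvBLoop lines field_indent raw start_index parts st next_index := by
  intro n
  induction n using Nat.strong_induction_on with
  | h n IH =>
    intro lines field_indent raw start_index parts st next_index hn h1 h2
    rw [pvALoop, pvBLoop]
    by_cases h : next_index < (lines.length : Int)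
    · rw [dif_pos h, dif_pos h]
      have hparts : parts ≠ [] := by
        intro e
        exact h2 (by simp [e, PySem.Chars.join, List.intercalate, PySem.Chars.lstrip])
      have key : ∀ piece : List Char,
          (pvExtractA (PySem.Chars.join ['\n'] (parts ++ [piece]))).isSome =
            pvScanFound (pvScan (pvScanStep st '\n') piece) := by
        intro piece
        rw [pv_extract_eq_scan, pv_join_append _ _ _ hparts, List.append_assoc,
          pv_lstrip_append _ _ h2, pv_scan_append, ← h1]
        rfl
      have hrec : ∀ piece : List Char,
          pvALoop lines field_indent raw start_index (parts ++ [piece]) (next_index + 1) =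
            pvBLoop lines field_indent raw start_index (parts ++ [piece])
              (pvScan (pvScanStep st '\n') piece) (next_index + 1) := by
        intro piece
        refine IH (((lines.length : Int) - (next_index + 1)).toNat) (by omega) lines field_indent
          raw start_index (parts ++ [piece]) _ (next_index + 1) rfl ?_ ?_
        · rw [pv_join_append _ _ _ hparts, List.append_assoc, pv_lstrip_append _ _ h2,
            pv_scan_append, ← h1]
          rfl
        · rw [pv_join_append _ _ _ hparts, List.append_assoc, pv_lstrip_append _ _ h2]
          simp [h2]
      by_cases hne : pvStripped (pvCand lines next_index) ≠ []
      · rw [if_pos hne]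
        by_cases hind : ((pvCand lines next_index).length : Int) -
            ((pvStripped (pvCand lines next_index)).length : Int) ≤ field_indent
        · rw [if_pos hind, if_pos ⟨hne, hind⟩]
        · rw [if_neg hind,
            if_neg (show ¬ (pvStripped (pvCand lines next_index) ≠ [] ∧
                ((pvCand lines next_index).length : Int) -
                  ((pvStripped (pvCand lines next_index)).length : Int) ≤ field_indent) from by
              rintro ⟨-, hh⟩; exact hind hh),
            key (pvStripped (pvCand lines next_index))]
          by_cases hf : pvScanFound (pvScan (pvScanStep st '\n')
              (pvStripped (pvCand lines next_index))) = true
          · rw [if_pos hf, if_pos hf]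
          · rw [if_neg hf, if_neg hf, hrec (pvStripped (pvCand lines next_index))]
      · rw [if_neg hne,
          if_neg (show ¬ (pvStripped (pvCand lines next_index) ≠ [] ∧
              ((pvCand lines next_index).length : Int) -
                ((pvStripped (pvCand lines next_index)).length : Int) ≤ field_indent) from by
            rintro ⟨hh, -⟩; exact hne hh)]
        have he : pvStripped (pvCand lines next_index) = [] := by simpa using hne
        rw [key ([] : List Char), ← he]
        by_cases hf : pvScanFound (pvScan (pvScanStep st '\n')
            (pvStripped (pvCand lines next_index))) = true
        · rw [if_pos hf, if_pos hf, he]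
        · rw [if_neg hf, if_neg hf, he, hrec ([] : List Char)]
    · rw [dif_neg h, dif_neg h]

-- ===== VERDICT (by name: the statement is the Claim_ definition above) =====
theorem consume_multiline_inline_env_mapping_py_spec : Claim_equal_consume_multiline_inline_env_mapping_py := by
  intro lines start_index raw field_indent _hdom _hpre
  unfold Spec_consume_multiline_inline_env_mapping_py
  unfold consume_multiline_inline_env_mapping_py consume_multiline_inline_env_mapping_py_alt
  simp only []
  rw [pv_extract_eq_scan_strip]
  by_cases hg : ¬ (PySem.Chars.startswith (PySem.Chars.strip raw.toList) ['{'] = true) ∨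
      pvScanFound (pvScan ⟨.start, 0, none⟩ (PySem.Chars.strip raw.toList)) = true
  · rw [if_pos hg, if_pos hg]
  · rw [if_neg hg, if_neg hg]
    push_neg at hg
    obtain ⟨hstart, -⟩ := hg
    have hone : PySem.Chars.join ['\n'] [PySem.Chars.rstrip raw.toList]
        = PySem.Chars.rstrip raw.toList := by
      simp [PySem.Chars.join, List.intercalate]
    have hne : PySem.Chars.strip raw.toList ≠ [] := by
      intro e
      rw [e] at hstart
      simp [PySem.Chars.startswith, List.isPrefixOf] at hstart
    exact pv_main_loop_eq (((lines.length : Int) - (start_index + 1)).toNat) lines field_indent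
      raw start_index [PySem.Chars.rstrip raw.toList] _ (start_index + 1) rfl
      (by rw [hone, pv_strip_comm]) (by rw [hone, pv_strip_comm]; exact hne)
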